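-- pv_equiv track=rewrite | github.com/A-lass/Algorithm-Study | ddingmin/baekjoon/14722.py | solve
-- ===== SOURCE A (Python) =====
-- def solve(n, arr):
--     dp = [[0] * n for _ in range(n)]
--
--     for i in range(n):
--         for j in range(n):
--             mDp = max(dp[i - 1][j], dp[i][j - 1])
--             if arr[i][j] == mDp % 3:
--                 dp[i][j] = mDp + 1
--             else:
--                 dp[i][j] = mDp
--
--     return dp[-1][-1]
-- ===== SOURCE B (Python) =====
-- def solve(n, arr):
--     # Top-down memoized recursion: compute only the cells the answer demands,
--     # caching values in a dict keyed by (i, j); out-of-range cells are 0.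
--     # The answer is read back from the cache (KeyError when the grid is empty).
--     memo = {}
--
--     def f(i, j):
--         if i < 0 or j < 0:
--             return 0
--         if (i, j) in memo:
--             return memo[(i, j)]
--         m = max(f(i - 1, j), f(i, j - 1))
--         v = m + 1 if arr[i][j] == m % 3 else m
--         memo[(i, j)] = v
--         return v
--
--     f(n - 1, n - 1)
--     return memo[(n - 1, n - 1)]
-- ===== Notes on version B (the rewrite author's own statement) =====
-- stated objective: alternative
-- what changed: B replaces A's bottom-up row-major fill of a preallocated n x n table (whose out-of-range neighbours are read via Python's negative-index wraparound into still-zero rows) by a top-down memoized recursion f(i,j) over a dict cache with an explicit base case 0 for i<0 or j<0, computing cells on demand from (n-1,n-1).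
import Mathlib
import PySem

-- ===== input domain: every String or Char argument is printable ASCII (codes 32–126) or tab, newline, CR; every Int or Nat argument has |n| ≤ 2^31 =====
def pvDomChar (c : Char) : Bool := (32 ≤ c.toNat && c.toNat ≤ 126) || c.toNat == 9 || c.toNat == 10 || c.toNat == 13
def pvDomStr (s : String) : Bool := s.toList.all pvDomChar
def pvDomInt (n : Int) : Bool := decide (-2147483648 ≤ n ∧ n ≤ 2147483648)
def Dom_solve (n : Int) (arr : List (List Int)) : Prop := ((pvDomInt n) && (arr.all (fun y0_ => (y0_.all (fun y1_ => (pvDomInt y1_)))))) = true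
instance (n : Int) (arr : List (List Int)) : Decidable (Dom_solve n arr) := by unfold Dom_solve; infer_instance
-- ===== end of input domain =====

-- B replaces A's bottom-up table fill by a top-down memoized recursion over a (i,j)-keyed dict with an explicit 0 base case; same values, different decomposition.

-- ===== PORT A =====
-- the body of A's inner 'for j' loop (dp[i][j] updated from dp[i-1][j], dp[i][j-1], arr[i][j])
def solveInner (arr : List (List Int)) (i : Int) (dp : List (List Int)) (j : Int) : List (List Int) :=
  let mDp := max (PySem.List.pyGetD (PySem.List.pyGetD dp (i-1) []) j 0)
                 (PySem.List.pyGetD (PySem.List.pyGetD dp i []) (j-1) 0)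
  if PySem.List.pyGetD (PySem.List.pyGetD arr i []) j 0 = PySem.Int.mod mDp 3 then
    dp.set i.toNat ((PySem.List.pyGetD dp i []).set j.toNat (mDp + 1))
  else
    dp.set i.toNat ((PySem.List.pyGetD dp i []).set j.toNat mDp)

def solve (n : Int) (arr : List (List Int)) : Int :=
  let dp0 : List (List Int) :=
    (PySem.List.pyRange 0 n 1).map (fun _ => List.replicate n.toNat (0:Int))
  let dp :=
    (PySem.List.pyRange 0 n 1).foldl (fun dp i =>
      (PySem.List.pyRange 0 n 1).foldl (solveInner arr i) dp) dp0
  PySem.List.pyGetD (PySem.List.pyGetD dp (-1) []) (-1) 0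

-- ===== PORT B =====
-- B's recursive helper f(i, j): state-passing memo dict threaded through the two recursive calls
def solveAltF (arr : List (List Int)) (i j : Int) (memo : PySem.Dict (Int × Int) Int) :
    Int × PySem.Dict (Int × Int) Int :=
  if i < 0 ∨ j < 0 then (0, memo)
  else
    match memo.get? (i, j) with
    | some v => (v, memo)
    | none =>
      let r1 := solveAltF arr (i - 1) j memo
      let r2 := solveAltF arr i (j - 1) r1.2
      let m := max r1.1 r2.1
      let v := if PySem.List.pyGetD (PySem.List.pyGetD arr i []) j 0 = PySem.Int.mod m 3 then m + 1
               else m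
      (v, r2.2.insert (i, j) v)
termination_by ((i + 1).toNat + (j + 1).toNat)
decreasing_by all_goals omega

-- 'return memo[(n-1, n-1)]': the .getD 0 default is never reached on Pre_ (KeyError = key absent, only when n ≤ 0, excluded by Pre_)
def solve_alt (n : Int) (arr : List (List Int)) : Int :=
  ((solveAltF arr (n - 1) (n - 1) PySem.Dict.empty).2.get? (n - 1, n - 1)).getD 0

-- ===== PRECONDITION & SPEC =====
-- Pre_ excludes exactly the inputs on which Python A raises IndexError: n ≤ 0 (dp[-1] on an
-- empty dp) or fewer than n rows, or one of the first n rows having fewer than n entries.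
def Pre_solve (n : Int) (arr : List (List Int)) : Prop :=
  1 ≤ n ∧ n.toNat ≤ arr.length ∧ ∀ r ∈ arr.take n.toNat, n.toNat ≤ r.length
instance (n : Int) (arr : List (List Int)) : Decidable (Pre_solve n arr) := by
  unfold Pre_solve; infer_instance
def pvWitness_solve : Int × List (List Int) := (2, [[0, 1], [1, 2]])

def Spec_solve (n : Int) (arr : List (List Int)) (out : Int) : Prop := out = solve_alt n arr
instance (n : Int) (arr : List (List Int)) (out : Int) : Decidable (Spec_solve n arr out) := by unfold Spec_solve; infer_instance

-- ===== CLAIM (what is proved, stated in full; the proofs are below) =====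
def Claim_equal_solve : Prop := ∀ (n : Int) (arr : List (List Int)), Dom_solve n arr → Pre_solve n arr → Spec_solve n arr (solve n arr)

-- ===== LEMMAS AND PROOFS =====

-- the mathematical recurrence both programs compute (arr read with getD defaults, as both ports do)
def pvA (arr : List (List Int)) (i j : Nat) : Int := (arr.getD i []).getD j 0

def G (arr : List (List Int)) (i j : Nat) (up lf : Int) : Int :=
  let m := max up lf
  if pvA arr i j = PySem.Int.mod m 3 then m + 1 else m

def F (arr : List (List Int)) : Nat → Nat → Int
  | 0, 0 => G arr 0 0 0 0
  | 0, j+1 => G arr 0 (j+1) 0 (F arr 0 j)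
  | i+1, 0 => G arr (i+1) 0 (F arr i 0) 0
  | i+1, j+1 => G arr (i+1) (j+1) (F arr i (j+1)) (F arr (i+1) j)
termination_by i j => (i, j)

def upVal (arr : List (List Int)) (i m : Nat) : Int :=
  match i with | 0 => 0 | Nat.succ i' => F arr i' m
def lfVal (arr : List (List Int)) (i m : Nat) : Int :=
  match m with | 0 => 0 | Nat.succ m' => F arr i m'

def rowF (arr : List (List Int)) (N i : Nat) : List Int := (List.range N).map (F arr i)

def partRow (arr : List (List Int)) (N i m : Nat) : List Int :=
  (List.range m).map (F arr i) ++ List.replicate (N - m) 0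

def dpPart (arr : List (List Int)) (N i m : Nat) : List (List Int) :=
  (List.range N).map (fun i' =>
    if i' < i then rowF arr N i' else if i' = i then partRow arr N i m else List.replicate N 0)

theorem F_eq (arr : List (List Int)) (i j : Nat) :
    F arr i j = G arr i j (upVal arr i j) (lfVal arr i j) := by
  cases i <;> cases j <;> simp [F, upVal, lfVal]

theorem getD_map_range' {α : Type} (f : Nat → α) (N k : Nat) (d : α) :
    ((List.range N).map f).getD k d = if k < N then f k else d := by
  by_cases h : k < N
  · simp [h, List.getD_eq_getElem?_getD]
  · rw [List.getD_eq_getElem?_getD, List.getElem?_eq_none (by simpa using Nat.le_of_not_lt h)]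
    simp [h]

theorem getLast_eq_getD {α : Type} (xs : List α) (h : xs ≠ []) (d : α) :
    xs.getLast h = xs.getD (xs.length - 1) d := by
  rw [List.getLast_eq_getElem, List.getD_eq_getElem?_getD,
    List.getElem?_eq_getElem (by have := List.length_pos_of_ne_nil h; omega)]
  simp

theorem partRow_length (arr : List (List Int)) (N i m : Nat) (_hm : m ≤ N) :
    (partRow arr N i m).length = N := by
  simp [partRow]; omega

theorem partRow_getD (arr : List (List Int)) (N i m k : Nat) (_hm : m ≤ N) :
    (partRow arr N i m).getD k 0 = if k < m then F arr i k else 0 := by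
  unfold partRow
  by_cases h : k < m
  · rw [List.getD_eq_getElem?_getD, List.getElem?_append_left (by simpa using h)]
    simp [h]
  · rw [List.getD_eq_getElem?_getD, List.getElem?_append_right (by simpa using Nat.le_of_not_lt h)]
    simp [h]

theorem partRow_zero (arr : List (List Int)) (N i : Nat) :
    partRow arr N i 0 = List.replicate N 0 := by simp [partRow]

theorem partRow_full (arr : List (List Int)) (N i : Nat) :
    partRow arr N i N = rowF arr N i := by simp [partRow, rowF]

theorem partRow_set (arr : List (List Int)) (N i m : Nat) (hm : m < N) :
    (partRow arr N i m).set m (F arr i m) = partRow arr N i (m+1) := by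
  unfold partRow
  have hrep : List.replicate (N - m) (0:Int) = 0 :: List.replicate (N - (m+1)) 0 := by
    have : N - m = (N - (m+1)) + 1 := by omega
    rw [this, List.replicate_succ]
  rw [List.set_append_right _ _ (by simp), hrep]
  simp [List.range_succ]

theorem dpPart_length (arr : List (List Int)) (N i m : Nat) :
    (dpPart arr N i m).length = N := by simp [dpPart]

theorem dpPart_getD (arr : List (List Int)) (N i m k : Nat) :
    (dpPart arr N i m).getD k [] =
      if k < N then
        (if k < i then rowF arr N k else if k = i then partRow arr N i m else List.replicate N 0)
      else [] := by
  unfold dpPart; rw [getD_map_range']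

theorem rowF_getD (arr : List (List Int)) (N i k : Nat) :
    (rowF arr N i).getD k 0 = if k < N then F arr i k else 0 := by
  unfold rowF; rw [getD_map_range']

theorem dpPart_set (arr : List (List Int)) (N i m m' : Nat) (hi : i < N) :
    (dpPart arr N i m).set i (partRow arr N i m') = dpPart arr N i m' := by
  apply List.ext_getElem
  · simp [dpPart]
  · intro k hk1 hk2
    rw [List.getElem_set]
    have hkN : k < N := by simpa [dpPart] using hk2
    by_cases h : k = i
    · subst h; simp [dpPart]
    · rw [if_neg (fun hh => h hh.symm)]
      simp [dpPart, h]

theorem dpPart_ne_nil (arr : List (List Int)) (N i m : Nat) (hN : 0 < N) :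
    dpPart arr N i m ≠ [] := by
  intro h
  have := dpPart_length arr N i m
  rw [h] at this
  simp at this
  omega

-- reading dp[i-1][j] during row i gives the row-above value (0 for the top row)
theorem inner_read_up (arr : List (List Int)) (N i m : Nat) (hi : i < N) (hm : m < N) :
    PySem.List.pyGetD (PySem.List.pyGetD (dpPart arr N i m) ((i:Int) - 1) []) (m:Int) 0 =
      upVal arr i m := by
  unfold upVal
  cases i with
  | zero =>
    have h0 : ((0:Nat):Int) - 1 = -1 := by norm_num
    rw [h0, PySem.List.pyGetD_neg_one (dpPart arr N 0 m) [] (dpPart_ne_nil arr N 0 m (by omega)),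
      getLast_eq_getD _ _ [], dpPart_length, dpPart_getD]
    have hN1 : N - 1 < N := by omega
    rw [if_pos hN1, if_neg (Nat.not_lt_zero _)]
    by_cases h1 : N - 1 = 0
    · rw [if_pos h1]
      simp only [PySem.List.pyGetD_natCast]
      rw [partRow_getD arr N 0 m m (by omega)]
      simp
    · rw [if_neg h1]
      simp
  | succ i' =>
    have h0 : ((Nat.succ i' : Nat):Int) - 1 = ((i' : Nat) : Int) := by push_cast; ring
    rw [h0]
    simp only [PySem.List.pyGetD_natCast]
    rw [dpPart_getD, if_pos (by omega : i' < N), if_pos (Nat.lt_succ_self i')]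
    rw [rowF_getD, if_pos hm]

-- reading dp[i][j-1] during row i gives the value to the left (0 in column 0)
theorem inner_read_left (arr : List (List Int)) (N i m : Nat) (_hi : i < N) (hm : m < N) :
    PySem.List.pyGetD (partRow arr N i m) ((m:Int) - 1) 0 =
      lfVal arr i m := by
  unfold lfVal
  cases m with
  | zero =>
    have h0 : ((0:Nat):Int) - 1 = -1 := by norm_num
    have hne : partRow arr N i 0 ≠ [] := by
      intro h
      have := partRow_length arr N i 0 (by omega)
      rw [h] at this; simp at this; omega
    rw [h0, PySem.List.pyGetD_neg_one _ 0 hne, getLast_eq_getD _ _ 0,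
      partRow_length arr N i 0 (by omega), partRow_getD arr N i 0 (N-1) (by omega)]
    simp
  | succ m' =>
    have h0 : ((Nat.succ m' : Nat):Int) - 1 = ((m' : Nat) : Int) := by push_cast; ring
    rw [h0]
    simp only [PySem.List.pyGetD_natCast]
    rw [partRow_getD arr N i (m'+1) m' (by omega)]
    simp

theorem dpPart_inner_step (arr : List (List Int)) (N i m : Nat)
    (hi : i < N) (hm : m < N) :
    solveInner arr (i : Int) (dpPart arr N i m) (m : Int) = dpPart arr N i (m+1) := by
  unfold solveInner
  have hrowi : PySem.List.pyGetD (dpPart arr N i m) (i:Int) [] = partRow arr N i m := by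
    simp only [PySem.List.pyGetD_natCast]
    rw [dpPart_getD]
    simp [hi]
  have harr : PySem.List.pyGetD (PySem.List.pyGetD arr (i:Int) []) (m:Int) 0 = pvA arr i m := by
    simp [pvA]
  have hFm := F_eq arr i m
  rw [hrowi, harr, inner_read_up arr N i m hi hm, inner_read_left arr N i m hi hm]
  simp only [G] at hFm
  simp only [Int.toNat_natCast]
  split_ifs with hc
  · rw [show upVal arr i m ⊔ lfVal arr i m + 1 = F arr i m by rw [hFm, if_pos hc]]
    rw [partRow_set arr N i m hm, dpPart_set arr N i m (m+1) hi]
  · rw [show upVal arr i m ⊔ lfVal arr i m = F arr i m by rw [hFm, if_neg hc]]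
    rw [partRow_set arr N i m hm, dpPart_set arr N i m (m+1) hi]

theorem dpPart_inner_fold (arr : List (List Int)) (N i : Nat) (hi : i < N) :
    ∀ m ≤ N, ((List.range m).map (fun k : Nat => (k : Int))).foldl (solveInner arr (i : Int))
      (dpPart arr N i 0) = dpPart arr N i m := by
  intro m
  induction m with
  | zero => intro _; simp
  | succ m ih =>
    intro hm
    rw [List.range_succ, List.map_append, List.foldl_append, ih (by omega)]
    simp only [List.map_cons, List.map_nil, List.foldl_cons, List.foldl_nil]
    exact dpPart_inner_step arr N i m hi (by omega)

theorem dpPart_row_done (arr : List (List Int)) (N i : Nat) :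
    dpPart arr N i N = dpPart arr N (i+1) 0 := by
  unfold dpPart
  apply List.map_congr_left
  intro k _
  by_cases h1 : k < i
  · rw [if_pos h1, if_pos (by omega : k < i + 1)]
  · by_cases h2 : k = i
    · rw [if_neg h1, if_pos h2, if_pos (by omega : k < i + 1), h2, partRow_full]
    · rw [if_neg h1, if_neg h2, if_neg (by omega : ¬ k < i + 1)]
      by_cases h3 : k = i + 1
      · rw [if_pos h3, partRow_zero]
      · rw [if_neg h3]

theorem dpPart_outer_fold (arr : List (List Int)) (N : Nat) :
    ∀ i ≤ N, ((List.range i).map (fun k : Nat => (k : Int))).foldl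
      (fun dp i => ((List.range N).map (fun k : Nat => (k : Int))).foldl (solveInner arr i) dp)
      (dpPart arr N 0 0) = dpPart arr N i 0 := by
  intro i
  induction i with
  | zero => intro _; simp
  | succ i ih =>
    intro hi
    rw [List.range_succ, List.map_append, List.foldl_append, ih (by omega)]
    simp only [List.map_cons, List.map_nil, List.foldl_cons, List.foldl_nil]
    rw [dpPart_inner_fold arr N i (by omega) N le_rfl, dpPart_row_done]

theorem rowF_ne_nil (arr : List (List Int)) (N i : Nat) (hN : 0 < N) :
    rowF arr N i ≠ [] := by
  intro h
  have : (rowF arr N i).length = N := by simp [rowF]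
  rw [h] at this; simp at this; omega

theorem solve_eq_F (n : Int) (arr : List (List Int)) (hn : 1 ≤ n) :
    solve n arr = F arr (n.toNat - 1) (n.toNat - 1) := by
  obtain ⟨N, rfl⟩ : ∃ N : Nat, n = (N:Int) := ⟨n.toNat, (Int.toNat_of_nonneg (by omega)).symm⟩
  have hN : 1 ≤ N := by omega
  simp only [solve, Int.toNat_natCast]
  rw [PySem.List.pyRange_zero_natCast N]
  have hdp0 : ((List.range N).map (fun k : Nat => (k:Int))).map (fun _ => List.replicate N (0:Int)) =
      dpPart arr N 0 0 := by
    rw [List.map_map]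
    unfold dpPart
    apply List.map_congr_left
    intro k _
    by_cases h : k = 0 <;> simp [h, partRow_zero]
  rw [hdp0, dpPart_outer_fold arr N N le_rfl]
  have hlast : PySem.List.pyGetD (dpPart arr N N 0) (-1) [] = rowF arr N (N-1) := by
    rw [PySem.List.pyGetD_neg_one _ _ (dpPart_ne_nil arr N N 0 (by omega)),
      getLast_eq_getD _ _ [], dpPart_length, dpPart_getD, if_pos (by omega : N - 1 < N),
      if_pos (by omega : N - 1 < N)]
  rw [hlast, PySem.List.pyGetD_neg_one _ _ (rowF_ne_nil arr N (N-1) (by omega)),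
    getLast_eq_getD _ _ 0, (show (rowF arr N (N-1)).length = N by simp [rowF]),
    rowF_getD, if_pos (by omega : N - 1 < N)]

-- ===== B-side proof: the memoized recursion computes F =====

-- the memo invariant: every cached entry is a correct F-value at nonnegative coordinates
def MemOK (arr : List (List Int)) (memo : PySem.Dict (Int × Int) Int) : Prop :=
  ∀ p v, memo.get? p = some v → 0 ≤ p.1 ∧ 0 ≤ p.2 ∧ v = F arr p.1.toNat p.2.toNat

theorem memOK_empty (arr : List (List Int)) : MemOK arr PySem.Dict.empty := by
  intro p v h
  rw [PySem.Dict.get?_empty] at h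
  exact absurd h (by simp)

theorem altF_correct (arr : List (List Int)) :
    ∀ (i j : Int) (memo : PySem.Dict (Int × Int) Int), MemOK arr memo →
      (solveAltF arr i j memo).1 = (if i < 0 ∨ j < 0 then 0 else F arr i.toNat j.toNat) ∧
      MemOK arr (solveAltF arr i j memo).2 ∧
      (¬ (i < 0 ∨ j < 0) →
        (solveAltF arr i j memo).2.get? (i, j) = some (F arr i.toNat j.toNat)) := by
  intro i j memo hmem
  induction i, j, memo using solveAltF.induct arr with
  | case1 i j memo hb =>
    rw [solveAltF, if_pos hb]
    exact ⟨by rw [if_pos hb], hmem, fun h => absurd hb h⟩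
  | case2 i j memo hb v hget =>
    rw [solveAltF, if_neg hb]
    simp only [hget]
    obtain ⟨_, _, hv⟩ := hmem (i, j) v hget
    exact ⟨by rw [if_neg hb]; exact hv, hmem, fun _ => by rw [hv]⟩
  | case3 i j memo hb hget r1 ih1 ih2 =>
    have hi : 0 ≤ i := by omega
    have hj : 0 ≤ j := by omega
    have hr1 : r1 = solveAltF arr (i - 1) j memo := rfl
    rw [hr1] at ih2
    have h1 := ih1 hmem
    have h2 := ih2 h1.2.1
    -- the two recursive results are the up/left neighbours of the recurrence
    have hup : (solveAltF arr (i - 1) j memo).1 = upVal arr i.toNat j.toNat := by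
      rw [h1.1]
      by_cases hc : i - 1 < 0
      · rw [if_pos (Or.inl hc)]
        have hz : i.toNat = 0 := by omega
        rw [hz]; rfl
      · rw [if_neg (show ¬(i - 1 < 0 ∨ j < 0) by omega)]
        have ha : (i - 1).toNat = i.toNat - 1 := by omega
        have hbn : i.toNat = (i.toNat - 1) + 1 := by omega
        rw [ha]
        conv_rhs => rw [hbn]
        rfl
    have hlf : (solveAltF arr i (j - 1) (solveAltF arr (i - 1) j memo).2).1
        = lfVal arr i.toNat j.toNat := by
      rw [h2.1]
      by_cases hc : j - 1 < 0
      · rw [if_pos (Or.inr hc)]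
        have hz : j.toNat = 0 := by omega
        rw [hz]; rfl
      · rw [if_neg (show ¬(i < 0 ∨ j - 1 < 0) by omega)]
        have ha : (j - 1).toNat = j.toNat - 1 := by omega
        have hbn : j.toNat = (j.toNat - 1) + 1 := by omega
        rw [ha]
        conv_rhs => rw [hbn]
        rfl
    have harr : PySem.List.pyGetD (PySem.List.pyGetD arr i []) j 0 = pvA arr i.toNat j.toNat := by
      rw [PySem.List.pyGetD_of_nonneg _ _ hi, PySem.List.pyGetD_of_nonneg _ _ hj]
      rfl
    -- the freshly computed value is F at (i, j)
    have hF : (if PySem.List.pyGetD (PySem.List.pyGetD arr i []) j 0 =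
          PySem.Int.mod (max (solveAltF arr (i - 1) j memo).1
            (solveAltF arr i (j - 1) (solveAltF arr (i - 1) j memo).2).1) 3 then
          max (solveAltF arr (i - 1) j memo).1
            (solveAltF arr i (j - 1) (solveAltF arr (i - 1) j memo).2).1 + 1
        else
          max (solveAltF arr (i - 1) j memo).1
            (solveAltF arr i (j - 1) (solveAltF arr (i - 1) j memo).2).1)
        = F arr i.toNat j.toNat := by
      rw [hup, hlf, harr, F_eq arr i.toNat j.toNat]
      rfl
    rw [solveAltF, if_neg hb]
    simp only [hget]
    refine ⟨by rw [if_neg hb]; exact hF, ?_, fun _ => by rw [PySem.Dict.get?_insert_self, hF]⟩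
    intro p v hv
    simp only [PySem.Dict.get?_insert] at hv
    by_cases hp : p = (i, j)
    · rw [if_pos hp] at hv
      subst hp
      have hveq := Option.some.inj hv
      exact ⟨hi, hj, by rw [← hveq]; exact hF⟩
    · rw [if_neg hp] at hv
      exact (h2.2.1) p v hv

theorem alt_eq_F (n : Int) (arr : List (List Int)) (hn : 1 ≤ n) :
    solve_alt n arr = F arr (n.toNat - 1) (n.toNat - 1) := by
  unfold solve_alt
  rw [(altF_correct arr (n - 1) (n - 1) PySem.Dict.empty (memOK_empty arr)).2.2
    (by omega)]
  simp only [Option.getD_some]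
  congr 1 <;> omega

-- ===== VERDICT (by name: the statement is the Claim_ definition above) =====
theorem solve_spec : Claim_equal_solve := by
  intro n arr _ hpre
  unfold Spec_solve
  rw [solve_eq_F n arr hpre.1, alt_eq_F n arr hpre.1]
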